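-- pv_equiv track=rewrite | github.com/FedaJakic/UmjetnaInteligencija_Kopilica | vjezba1/zadatak2.py | isContainingSameNumbers
-- ===== SOURCE A (Python) =====
-- def isContainingSameNumbers(firstNumber, secondNumber):
--     checkedNumbers = []
--     for i in range(len(firstNumber)):
--         if isAlreadyChecked(checkedNumbers, firstNumber[i]):
--             continue
--         else:
--             if(firstNumber[i] != secondNumber[i]):
--                 return "Numbers are NOT SAME"
--
--             checkedNumbers.append(firstNumber[i])
--
--     return "Numbers are SAME"
--
-- def isAlreadyChecked(checkedNumbers, target):
--     for number in checkedNumbers: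
--         if number == target:
--             return True
--
--     else:
--         return False
-- ===== SOURCE B (Python) =====
-- def isContainingSameNumbers(firstNumber, secondNumber):
--     # worklist of remaining positions; duplicates of an already-compared
--     # character are removed by filtering, so no 'seen' structure is kept
--     pending = list(range(len(firstNumber)))
--     while pending:
--         i, rest = pending[0], pending[1:]
--         c = firstNumber[i]
--         if c != secondNumber[i]:
--             return "Numbers are NOT SAME"
--         pending = [j for j in rest if firstNumber[j] != c]
--     return "Numbers are SAME"
-- ===== Notes on version B (the rewrite author's own statement) =====
-- stated objective: alternative
-- what changed: Replaces A's grow-a-checked-list-and-scan-it-for-membership scheme by a shrinking worklist of positions: after comparing a character, all later positions holding that character are filtered out, so no seen-set or membership test exists at all.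
import Mathlib
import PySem

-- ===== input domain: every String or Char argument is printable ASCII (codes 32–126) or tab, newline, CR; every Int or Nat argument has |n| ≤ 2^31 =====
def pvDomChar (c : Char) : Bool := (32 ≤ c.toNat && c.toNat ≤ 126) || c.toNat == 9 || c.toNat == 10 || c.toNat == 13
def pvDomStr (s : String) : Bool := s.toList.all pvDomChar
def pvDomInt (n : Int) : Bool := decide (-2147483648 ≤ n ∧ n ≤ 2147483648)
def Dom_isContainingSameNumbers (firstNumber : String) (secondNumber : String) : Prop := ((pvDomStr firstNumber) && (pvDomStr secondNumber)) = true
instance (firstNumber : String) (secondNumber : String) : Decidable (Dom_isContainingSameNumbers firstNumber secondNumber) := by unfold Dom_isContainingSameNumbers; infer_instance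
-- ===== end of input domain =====

-- B replaces A's grow-a-checked-list-and-scan-for-membership scheme by a shrinking worklist of
-- positions from which duplicates are filtered out after each comparison (alternative decomposition;
-- return value only, neither program mutates its arguments).

-- ===== PORT A =====
-- helper isAlreadyChecked: linear scan of the checked list
def isAlreadyChecked (checkedNumbers : List Char) (target : Char) : Bool :=
  match checkedNumbers with
  | [] => false
  | number :: rest => if number == target then true else isAlreadyChecked rest target

-- the for-loop over range(len(firstNumber)) with the mutable checkedNumbers list;
-- `second[i]?` = none is Python's IndexError (excluded by Pre_), ported as "".
def pvLoopA (first second : List Char) : List Nat → List Char → String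
  | [], _ => "Numbers are SAME"
  | i :: rest, checked =>
    if isAlreadyChecked checked (first.getD i ' ') then
      pvLoopA first second rest checked
    else
      match second[i]? with
      | none => ""
      | some s =>
        if first.getD i ' ' ≠ s then "Numbers are NOT SAME"
        else pvLoopA first second rest (checked ++ [first.getD i ' '])

def isContainingSameNumbers (firstNumber : String) (secondNumber : String) : String :=
  pvLoopA firstNumber.toList secondNumber.toList (List.range firstNumber.toList.length) []

-- ===== PORT B =====
-- the while-loop over the shrinking worklist `pending`; `second[i]?` = none is Python's
-- IndexError (excluded by Pre_), ported as "".
def pvLoopB (first second : List Char) : List Nat → String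
  | [] => "Numbers are SAME"
  | i :: rest =>
    match second[i]? with
    | none => ""
    | some s =>
      if first.getD i ' ' ≠ s then "Numbers are NOT SAME"
      else pvLoopB first second (rest.filter (fun j => first.getD j ' ' != first.getD i ' '))
  termination_by l => l.length
  decreasing_by
    simp [List.length_filter_le]

def isContainingSameNumbers_alt (firstNumber : String) (secondNumber : String) : String :=
  pvLoopB firstNumber.toList secondNumber.toList (List.range firstNumber.toList.length)

-- ===== PRECONDITION & SPEC =====
-- Pre_ excludes exactly the inputs where Python A raises IndexError: a first-occurrence index
-- of firstNumber that is out of range for secondNumber and is not preceded by an in-range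
-- mismatching first-occurrence index (B raises there too).
def Pre_isContainingSameNumbers (firstNumber : String) (secondNumber : String) : Prop :=
  ∀ i < firstNumber.toList.length,
    firstNumber.toList.getD i ' ' ∉ firstNumber.toList.take i →
    secondNumber.toList.length ≤ i →
    ∃ j < i, firstNumber.toList.getD j ' ' ∉ firstNumber.toList.take j ∧
      j < secondNumber.toList.length ∧
      firstNumber.toList.getD j ' ' ≠ secondNumber.toList.getD j ' '
instance (firstNumber : String) (secondNumber : String) : Decidable (Pre_isContainingSameNumbers firstNumber secondNumber) := by
  unfold Pre_isContainingSameNumbers; exact Nat.decidableBallLT _ _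

def pvWitness_isContainingSameNumbers : String × String := ("aba", "abz")

def Spec_isContainingSameNumbers (firstNumber : String) (secondNumber : String) (out : String) : Prop := out = isContainingSameNumbers_alt firstNumber secondNumber
instance (firstNumber : String) (secondNumber : String) (out : String) : Decidable (Spec_isContainingSameNumbers firstNumber secondNumber out) := by unfold Spec_isContainingSameNumbers; infer_instance

-- ===== CLAIM (what is proved, stated in full; the proofs are below) =====
def Claim_equal_isContainingSameNumbers : Prop := ∀ (firstNumber : String) (secondNumber : String), Dom_isContainingSameNumbers firstNumber secondNumber → Pre_isContainingSameNumbers firstNumber secondNumber → Spec_isContainingSameNumbers firstNumber secondNumber (isContainingSameNumbers firstNumber secondNumber)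

-- ===== LEMMAS AND PROOFS =====

theorem isAlreadyChecked_append (checked : List Char) (c x : Char) :
    isAlreadyChecked (checked ++ [c]) x = (isAlreadyChecked checked x || x == c) := by
  induction checked with
  | nil => simp [isAlreadyChecked]; by_cases h : c = x <;> simp [h, BEq.comm]
  | cons y ys ih => by_cases h : y == x <;> simp [isAlreadyChecked, h, ih]

-- invariant: A's loop with checked list equals B's loop on the worklist with the
-- already-checked characters filtered out
theorem loopA_eq_loopB (first second : List Char) :
    ∀ (idxs : List Nat) (checked : List Char),
      pvLoopA first second idxs checked =
        pvLoopB first second (idxs.filter (fun j => !isAlreadyChecked checked (first.getD j ' '))) := by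
  intro idxs
  induction idxs with
  | nil => intro checked; simp [pvLoopA, pvLoopB]
  | cons i rest ih =>
    intro checked
    rw [pvLoopA]
    by_cases hch : isAlreadyChecked checked (first.getD i ' ')
    · rw [if_pos hch, ih, List.filter_cons_of_neg (by simp only [List.getD] at hch ⊢; simp [hch])]
    · rw [if_neg hch, List.filter_cons_of_pos (by simp only [List.getD] at hch ⊢; simp [hch]), pvLoopB]
      cases hs : second[i]? with
      | none => rfl
      | some s =>
        by_cases hne : first.getD i ' ' = s
        · simp only [hne, ne_eq, not_true_eq_false, if_false]
          rw [ih, List.filter_filter]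
          congr 1
          apply List.filter_congr
          intro j _
          simp only [List.getD] at *
          rw [isAlreadyChecked_append]
          cases h1 : isAlreadyChecked checked (first[j]?.getD ' ') <;>
            by_cases h2 : first[j]?.getD ' ' = s <;> simp [h1, h2, bne]
        · simp only [if_pos hne]

-- ===== VERDICT (by name: the statement is the Claim_ definition above) =====
theorem isContainingSameNumbers_spec : Claim_equal_isContainingSameNumbers := by
  intro firstNumber secondNumber _ _
  unfold Spec_isContainingSameNumbers isContainingSameNumbers isContainingSameNumbers_alt
  rw [loopA_eq_loopB]
  congr 1
  simp [isAlreadyChecked]
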